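-- pv_equiv track=rewrite | github.com/Zaharakatd22/PythonTrainingProblems | Number sequence.py | f
-- ===== SOURCE A (Python) =====
-- def f(x):
--     c: int = 0
--     for i in range(x + 1):
--         for _ in range(i):
--             yield i
--             c += 1
--             if c == x:
--                 return
-- ===== SOURCE B (Python) =====
-- def f(x):
--     i = 0
--     remaining = 0
--     for _ in range(x):
--         if remaining == 0:
--             i += 1
--             remaining = i
--         yield i
--         remaining -= 1
-- ===== Notes on version B (the rewrite author's own statement) =====
-- stated objective: simpler
-- what changed: Flat single loop over range(x) maintaining (current value, remaining repeats) state replaces the nested loops with an explicit yield counter and early return.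
import Mathlib
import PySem

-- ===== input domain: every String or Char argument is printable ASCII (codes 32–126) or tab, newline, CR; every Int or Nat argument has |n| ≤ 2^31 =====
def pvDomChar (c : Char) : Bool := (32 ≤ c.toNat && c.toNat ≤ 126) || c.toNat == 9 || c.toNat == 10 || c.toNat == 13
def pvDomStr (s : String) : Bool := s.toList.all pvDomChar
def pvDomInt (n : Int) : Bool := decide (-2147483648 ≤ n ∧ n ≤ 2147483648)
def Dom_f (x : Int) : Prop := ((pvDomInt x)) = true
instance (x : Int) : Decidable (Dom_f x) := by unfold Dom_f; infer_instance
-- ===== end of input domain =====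

-- B replaces A's nested loops with a kill counter by a flat single loop over a
-- (current value, remaining repeats) state machine; objective: simpler.


-- ===== PORT A =====
-- inner 'for _ in range(i)' loop: yields i, counts c up, early-returns when c == x.
-- result: (yielded list, final c, did-return flag)
def fInner (i x : Int) : Nat → Int → List Int × Int × Bool
  | 0, c => ([], c, false)
  | k + 1, c =>
      if c + 1 == x then ([i], c + 1, true)
      else
        let r := fInner i x k (c + 1)
        (i :: r.1, r.2)

-- outer 'for i in range(x + 1)' loop over the remaining range values, carrying c
def fOuter (x : Int) : List Int → Int → List Int
  | [], _ => []
  | i :: rest, c =>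
      let r := fInner i x i.toNat c
      if r.2.2 then r.1 else r.1 ++ fOuter x rest r.2.1

def f (x : Int) : List Int := fOuter x (PySem.List.pyRange 0 (x + 1) 1) 0

-- ===== PORT B =====
-- 'for _ in range(x)' with state (i, remaining); x.toNat = number of iterations
def fLoop : Nat → Int → Int → List Int
  | 0, _, _ => []
  | n + 1, i, remaining =>
      if remaining == 0 then (i + 1) :: fLoop n (i + 1) i
      else i :: fLoop n i (remaining - 1)

def f_alt (x : Int) : List Int := fLoop x.toNat 0 0

-- ===== PRECONDITION & SPEC =====
def Spec_f (x : Int) (out : List Int) : Prop := out = f_alt x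
instance (x : Int) (out : List Int) : Decidable (Spec_f x out) := by unfold Spec_f; infer_instance

-- ===== CLAIM (what is proved, stated in full; the proofs are below) =====
def Claim_equal_f : Prop := ∀ (x : Int), Dom_f x → Spec_f x (f x)

-- ===== LEMMAS AND PROOFS =====

-- A's inner loop characterised: with c < x it yields min(k, x-c) copies of i
theorem fInner_eq (k : Nat) : ∀ (i x c : Int), c < x →
    fInner i x k c =
      if x ≤ c + k then (List.replicate (x - c).toNat i, x, true)
      else (List.replicate k i, c + k, false) := by
  induction k with
  | zero =>
      intro i x c hc
      simp [fInner]
      omega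
  | succ k ih =>
      intro i x c hc
      by_cases h1 : c + 1 = x
      · have hxle : x ≤ c + ((k : Int) + 1) := by omega
        have ht : (x - c).toNat = 1 := by omega
        simp [fInner, h1, hxle, ht]
      · have hc1 : c + 1 < x := by omega
        have hne : (c + 1 == x) = false := by simp; omega
        rw [show fInner i x (k+1) c =
            (i :: (fInner i x k (c+1)).1, (fInner i x k (c+1)).2) by
          simp [fInner, hne]]
        rw [ih i x (c+1) hc1]
        by_cases h2 : x ≤ c + 1 + (k : Int)
        · rw [if_pos h2]
          rw [if_pos (show x ≤ c + ((k+1 : Nat) : Int) by push_cast; omega)]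
          have ht : (x - c).toNat = (x - (c+1)).toNat + 1 := by omega
          simp [ht, List.replicate_succ]
        · rw [if_neg h2]
          rw [if_neg (show ¬ x ≤ c + ((k+1 : Nat) : Int) by push_cast; omega)]
          simp [List.replicate_succ]
          omega

-- B's loop with remaining = r yields min(n, r) copies of i then resumes at remaining = 0
theorem fLoop_split (r : Nat) : ∀ (n : Nat) (i : Int),
    fLoop n i (r : Int) = List.replicate (min n r) i ++ fLoop (n - r) i 0 := by
  induction r with
  | zero => intro n i; simp
  | succ r ih =>
      intro n i
      cases n with
      | zero => simp [fLoop]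
      | succ n =>
          have hne : (((r : Int) + 1) == 0) = false := by simp; omega
          have hc : ((r + 1 : Nat) : Int) = (r : Int) + 1 := by push_cast; ring
          rw [show fLoop (n+1) i ((r+1 : Nat) : Int)
              = i :: fLoop n i (((r:Nat) : Int) + 1 - 1) by
            simp [fLoop, hc, hne]]
          simp only [add_sub_cancel_right]
          rw [ih n i]
          have hmin : min (n+1) (r+1) = min n r + 1 := by omega
          simp [hmin, List.replicate_succ, Nat.succ_sub_succ]

-- one step of B's loop from the remaining = 0 state
theorem fLoop_step (p : Nat) (j : Int) :
    fLoop (p+1) j 0 = (j+1) :: fLoop p (j+1) j := by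
  simp [fLoop]

-- main invariant: A's remaining outer loop from value i with counter c equals
-- B's loop with x - c steps to go, state (i - 1, 0)
theorem outer_eq_loop (m : Nat) : ∀ (i c x : Int), 1 ≤ i → 0 ≤ c → c < x → i ≤ x →
    m = (x + 1 - i).toNat →
    fOuter x (PySem.List.pyRange i (x + 1) 1) c = fLoop (x - c).toNat (i - 1) 0 := by
  induction m with
  | zero => intro i c x h1 h2 h3 h4 hm; omega
  | succ m ih =>
      intro i c x h1 h2 h3 h4 hm
      rw [PySem.List.pyRange_one_cons (by omega)]
      rw [show fOuter x (i :: PySem.List.pyRange (i+1) (x+1) 1) c =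
          (let r := fInner i x i.toNat c
           if r.2.2 then r.1 else r.1 ++ fOuter x (PySem.List.pyRange (i+1) (x+1) 1) r.2.1)
          from rfl]
      rw [fInner_eq i.toNat i x c h3]
      obtain ⟨p, hp⟩ : ∃ p, (x - c).toNat = p + 1 := ⟨(x - c).toNat - 1, by omega⟩
      by_cases hstop : x ≤ c + (i.toNat : Int)
      · -- inner loop early-returns: both sides are (x - c) copies of i
        simp only [hstop, if_pos]
        rw [hp, fLoop_step]
        rw [show (i - 1 + 1 : Int) = i by ring]
        rw [show (i - 1 : Int) = (((i-1).toNat : Nat) : Int) by omega]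
        rw [fLoop_split ((i-1).toNat) p i]
        have hmin : min p (i.toNat - 1) = p := by omega
        have hz : p - (i.toNat - 1) = 0 := by omega
        simp [hmin, hz, fLoop, List.replicate_succ]
      · -- inner loop completes: peel i copies of i off both sides, recurse
        simp only [hstop, if_neg, not_false_iff]
        simp only [Bool.false_eq_true, if_neg, not_false_iff]
        rw [ih (i+1) (c + (i.toNat : Int)) x (by omega) (by omega) (by omega) (by omega) (by omega)]
        rw [show (i + 1 - 1 : Int) = i by ring]
        rw [hp, fLoop_step]
        rw [show (i - 1 + 1 : Int) = i by ring]
        rw [show (i - 1 : Int) = (((i-1).toNat : Nat) : Int) by omega]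
        rw [fLoop_split ((i-1).toNat) p i]
        have hmin : min p (i-1).toNat = (i-1).toNat := by omega
        have hsub : p - (i-1).toNat = (x - (c + (i.toNat : Int))).toNat := by omega
        rw [hmin, hsub]
        rw [show (i.toNat : Nat) = (i-1).toNat + 1 by omega]
        simp [List.replicate_succ]

-- ===== VERDICT (by name: the statement is the Claim_ definition above) =====
theorem f_spec : Claim_equal_f := by
  intro x _
  unfold Spec_f f f_alt
  by_cases hx : 1 ≤ x
  · rw [PySem.List.pyRange_one_cons (by omega)]
    rw [show fOuter x (0 :: PySem.List.pyRange (0+1) (x+1) 1) 0 =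
        (let r := fInner 0 x (0:Int).toNat 0
         if r.2.2 then r.1 else r.1 ++ fOuter x (PySem.List.pyRange (0+1) (x+1) 1) r.2.1)
        from rfl]
    simp only [Int.toNat_zero, fInner]
    rw [show (0 + 1 : Int) = 1 from rfl]
    rw [outer_eq_loop x.toNat 1 0 x (by omega) le_rfl (by omega) (by omega) (by omega)]
    simp
  · by_cases hx0 : x = 0
    · subst hx0; decide
    · rw [PySem.List.pyRange_one_eq_nil (by omega)]
      rw [show x.toNat = 0 by omega]
      rfl
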